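-- pv_equiv track=rewrite | github.com/PAFGYM/k-quant-system | src/kstock/bot/messages.py | format_daily_actions
-- ===== SOURCE A (Python) =====
-- USER_NAME = "주호님"
--
-- def format_daily_actions(actions: list[dict], alert_mode: str = "normal") -> str:
--     """오늘의 할 일 포맷."""
--     mode_label = {
--         "normal": "\U0001f7e2 일상",
--         "elevated": "\U0001f7e1 경계",
--         "wartime": "\U0001f534 전시",
--     }.get(alert_mode, "")
--
--     if not actions:
--         return (
--             f"\U0001f4cb {USER_NAME}, 오늘의 할 일\n"
--             f"{'━' * 22}\n"
--             f"경계 모드: {mode_label}\n\n"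
--             "오늘은 특별한 조치가 필요 없습니다.\n"
--             "시장 상황을 지켜보세요! \U0001f440"
--         )
--
--     priority_labels = {
--         "urgent": "\U0001f534 긴급 조치",
--         "caution": "\U0001f7e1 주의 필요",
--         "opportunity": "\U0001f7e2 매수 기회",
--         "check": "\u26aa 확인 사항",
--     }
--
--     lines = [
--         f"\U0001f4cb {USER_NAME}, 오늘의 할 일",
--         "━" * 22,
--         f"경계 모드: {mode_label}",
--         "",
--     ]
--
--     for p in ("urgent", "caution", "opportunity", "check"):
--         items = [a for a in actions if a.get("priority") == p]
--         if not items: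
--             continue
--         lines.append(priority_labels[p])
--         for item in items:
--             lines.append(f"  {item['name']}: {item['action']}")
--             manager_label = str(item.get("manager_label", "") or "").strip()
--             reason = str(item.get("reason", "") or "").strip()
--             if manager_label:
--                 lines.append(f"    \u2514 {manager_label} | {reason}")
--             else:
--                 lines.append(f"    \u2514 {reason}")
--         lines.append("")
--
--     cnt = {p: sum(1 for a in actions if a.get("priority") == p)
--            for p in ("urgent", "caution", "opportunity", "check")}
--     lines.append("━" * 22)
--     lines.append(
--         f"총 {len(actions)}건 | "
--         f"\U0001f534{cnt['urgent']} \U0001f7e1{cnt['caution']} "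
--         f"\U0001f7e2{cnt['opportunity']} \u26aa{cnt['check']}"
--     )
--     return "\n".join(lines)
-- ===== SOURCE B (Python) =====
-- USER_NAME = "주호님"
--
--
-- def _item_lines(item):
--     manager_label = str(item.get("manager_label", "") or "").strip()
--     reason = str(item.get("reason", "") or "").strip()
--     tail = f"    \u2514 {manager_label} | {reason}" if manager_label else f"    \u2514 {reason}"
--     return [f"  {item['name']}: {item['action']}", tail]
--
--
-- def _section(label, items):
--     if not items:
--         return []
--     return [label] + [line for item in items for line in _item_lines(item)] + [""]
--
--
-- def format_daily_actions(actions: list[dict], alert_mode: str = "normal") -> str: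
--     """오늘의 할 일 포맷."""
--     mode_label = {
--         "normal": "\U0001f7e2 일상",
--         "elevated": "\U0001f7e1 경계",
--         "wartime": "\U0001f534 전시",
--     }.get(alert_mode, "")
--
--     if not actions:
--         return (
--             f"\U0001f4cb {USER_NAME}, 오늘의 할 일\n"
--             f"{'━' * 22}\n"
--             f"경계 모드: {mode_label}\n\n"
--             "오늘은 특별한 조치가 필요 없습니다.\n"
--             "시장 상황을 지켜보세요! \U0001f440"
--         )
--
--     # one pass: split the actions into the four priority buckets (input order kept)
--     urgent, caution, opportunity, check = [], [], [], []
--     for a in actions: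
--         p = a.get("priority")
--         if p == "urgent":
--             urgent.append(a)
--         elif p == "caution":
--             caution.append(a)
--         elif p == "opportunity":
--             opportunity.append(a)
--         elif p == "check":
--             check.append(a)
--
--     header = [
--         f"\U0001f4cb {USER_NAME}, 오늘의 할 일",
--         "━" * 22,
--         f"경계 모드: {mode_label}",
--         "",
--     ]
--     body = (
--         _section("\U0001f534 긴급 조치", urgent)
--         + _section("\U0001f7e1 주의 필요", caution)
--         + _section("\U0001f7e2 매수 기회", opportunity)
--         + _section("\u26aa 확인 사항", check)
--     )
--     footer = [
--         "━" * 22,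
--         f"총 {len(actions)}건 | "
--         f"\U0001f534{len(urgent)} \U0001f7e1{len(caution)} "
--         f"\U0001f7e2{len(opportunity)} \u26aa{len(check)}",
--     ]
--     return "\n".join(header + body + footer)
-- ===== Notes on version B (the rewrite author's own statement) =====
-- stated objective: alternative
-- what changed: Replaces A's eight scans of the action list (a filter plus a count per priority) by a single pass that splits the actions into the four priority buckets, then emits each section and derives the counts from the bucket lengths.
import Mathlib
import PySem

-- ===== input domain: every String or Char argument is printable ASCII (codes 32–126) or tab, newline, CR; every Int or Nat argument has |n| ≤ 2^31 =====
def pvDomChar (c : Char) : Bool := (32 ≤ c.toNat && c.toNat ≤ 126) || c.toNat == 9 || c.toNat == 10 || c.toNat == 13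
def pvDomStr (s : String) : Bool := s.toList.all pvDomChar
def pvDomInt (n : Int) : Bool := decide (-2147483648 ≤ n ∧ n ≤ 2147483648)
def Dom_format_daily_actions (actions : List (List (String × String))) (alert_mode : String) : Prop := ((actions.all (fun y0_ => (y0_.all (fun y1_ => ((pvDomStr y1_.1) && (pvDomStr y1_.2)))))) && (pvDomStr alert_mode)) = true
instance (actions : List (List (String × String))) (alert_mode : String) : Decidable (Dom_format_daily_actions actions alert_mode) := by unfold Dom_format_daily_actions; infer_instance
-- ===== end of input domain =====

-- B replaces A's eight scans of the action list (a filter plus a count per priority) by a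
-- single pass splitting the actions into four priority buckets; same return value on Pre_ (objective: alternative).

-- ===== PORT A =====
-- a.get(k) / str(a.get(k, "") or "").strip() on an action dict (first match, as in a Python dict built from the pairs)
def agGet (a : List (String × String)) (k : String) : Option String :=
  PySem.Dict.get? (PySem.Dict.mk a) k

def agGetD (a : List (String × String)) (k : String) : String :=
  PySem.Dict.getD (PySem.Dict.mk a) k ""

-- the body of A's inner 'for item in items' loop (appends the two lines of one item)
def aInnerStep (lines : List String) (item : List (String × String)) : List String :=
  let lines := lines ++ ["  " ++ agGetD item "name" ++ ": " ++ agGetD item "action"]  -- item['name'] / item['action']: Pre_ guarantees the keys (KeyError otherwise)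
  let manager_label := PySem.Str.strip (agGetD item "manager_label")
  let reason := PySem.Str.strip (agGetD item "reason")
  if manager_label == "" then lines ++ ["    └ " ++ reason]
  else lines ++ ["    └ " ++ manager_label ++ " | " ++ reason]

-- the body of A's outer loop over the four priorities
def aOuterStep (actions : List (List (String × String))) (lines : List String) (p : String) : List String :=
  let priority_labels := PySem.Dict.mk [("urgent", "🔴 긴급 조치"), ("caution", "🟡 주의 필요"), ("opportunity", "🟢 매수 기회"), ("check", "⚪ 확인 사항")]
  let items := actions.filter (fun a => agGet a "priority" == some p)
  if items = [] then lines
  else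
    let lines := lines ++ [PySem.Dict.getD priority_labels p ""]
    let lines := items.foldl aInnerStep lines
    lines ++ [""]

def format_daily_actions (actions : List (List (String × String))) (alert_mode : String) : String :=
  let mode_label := PySem.Dict.getD (PySem.Dict.mk [("normal", "🟢 일상"), ("elevated", "🟡 경계"), ("wartime", "🔴 전시")]) alert_mode ""
  if actions = [] then
    "📋 주호님, 오늘의 할 일\n" ++ "━━━━━━━━━━━━━━━━━━━━━━" ++ "\n경계 모드: " ++ mode_label
      ++ "\n\n오늘은 특별한 조치가 필요 없습니다.\n시장 상황을 지켜보세요! 👀"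
  else
    let lines : List String := ["📋 주호님, 오늘의 할 일", "━━━━━━━━━━━━━━━━━━━━━━", "경계 모드: " ++ mode_label, ""]
    let lines := ["urgent", "caution", "opportunity", "check"].foldl (aOuterStep actions) lines
    let cnt := PySem.Dict.mk (["urgent", "caution", "opportunity", "check"].map
      (fun p => (p, (List.countP (fun a => agGet a "priority" == some p) actions : Int))))
    let lines := lines ++ ["━━━━━━━━━━━━━━━━━━━━━━"]
    let lines := lines ++ ["총 " ++ PySem.Int.toStr (actions.length : Int) ++ "건 | 🔴"
      ++ PySem.Int.toStr (PySem.Dict.getD cnt "urgent" 0) ++ " 🟡" ++ PySem.Int.toStr (PySem.Dict.getD cnt "caution" 0)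
      ++ " 🟢" ++ PySem.Int.toStr (PySem.Dict.getD cnt "opportunity" 0) ++ " ⚪" ++ PySem.Int.toStr (PySem.Dict.getD cnt "check" 0)]
    PySem.Str.join "\n" lines

-- ===== PORT B =====
-- _item_lines(item)
def bItemLines (item : List (String × String)) : List String :=
  let manager_label := PySem.Str.strip (PySem.Dict.getD (PySem.Dict.mk item) "manager_label" "")
  let reason := PySem.Str.strip (PySem.Dict.getD (PySem.Dict.mk item) "reason" "")
  let tail := if manager_label == "" then "    └ " ++ reason else "    └ " ++ manager_label ++ " | " ++ reason
  ["  " ++ PySem.Dict.getD (PySem.Dict.mk item) "name" "" ++ ": " ++ PySem.Dict.getD (PySem.Dict.mk item) "action" "", tail]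

-- _section(label, items)
def bSection (label : String) (items : List (List (String × String))) : List String :=
  if items = [] then [] else [label] ++ items.flatMap bItemLines ++ [""]

-- the body of B's single grouping pass
def bSplitStep (bs : List (List (String × String)) × List (List (String × String)) × List (List (String × String)) × List (List (String × String)))
    (a : List (String × String)) :
    List (List (String × String)) × List (List (String × String)) × List (List (String × String)) × List (List (String × String)) :=
  let p := PySem.Dict.get? (PySem.Dict.mk a) "priority"
  if p == some "urgent" then (bs.1 ++ [a], bs.2.1, bs.2.2.1, bs.2.2.2)
  else if p == some "caution" then (bs.1, bs.2.1 ++ [a], bs.2.2.1, bs.2.2.2)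
  else if p == some "opportunity" then (bs.1, bs.2.1, bs.2.2.1 ++ [a], bs.2.2.2)
  else if p == some "check" then (bs.1, bs.2.1, bs.2.2.1, bs.2.2.2 ++ [a])
  else bs

def format_daily_actions_alt (actions : List (List (String × String))) (alert_mode : String) : String :=
  let mode_label := PySem.Dict.getD (PySem.Dict.mk [("normal", "🟢 일상"), ("elevated", "🟡 경계"), ("wartime", "🔴 전시")]) alert_mode ""
  if actions = [] then
    "📋 주호님, 오늘의 할 일\n" ++ "━━━━━━━━━━━━━━━━━━━━━━" ++ "\n경계 모드: " ++ mode_label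
      ++ "\n\n오늘은 특별한 조치가 필요 없습니다.\n시장 상황을 지켜보세요! 👀"
  else
    let bs := actions.foldl bSplitStep ([], [], [], [])
    let header : List String := ["📋 주호님, 오늘의 할 일", "━━━━━━━━━━━━━━━━━━━━━━", "경계 모드: " ++ mode_label, ""]
    let body := bSection "🔴 긴급 조치" bs.1 ++ bSection "🟡 주의 필요" bs.2.1
      ++ bSection "🟢 매수 기회" bs.2.2.1 ++ bSection "⚪ 확인 사항" bs.2.2.2
    let footer : List String := ["━━━━━━━━━━━━━━━━━━━━━━", "총 " ++ PySem.Int.toStr (actions.length : Int) ++ "건 | 🔴"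
      ++ PySem.Int.toStr (bs.1.length : Int) ++ " 🟡" ++ PySem.Int.toStr (bs.2.1.length : Int)
      ++ " 🟢" ++ PySem.Int.toStr (bs.2.2.1.length : Int) ++ " ⚪" ++ PySem.Int.toStr (bs.2.2.2.length : Int)]
    PySem.Str.join "\n" (header ++ body ++ footer)

-- ===== PRECONDITION & SPEC =====
-- Pre_ excludes exactly the inputs on which Python A raises KeyError: an action whose
-- 'priority' is one of the four emitted groups but which lacks a 'name' or 'action' key.
def Pre_format_daily_actions (actions : List (List (String × String))) (alert_mode : String) : Prop :=
  ∀ a ∈ actions,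
    (PySem.Dict.get? (PySem.Dict.mk a) "priority" = some "urgent" ∨
     PySem.Dict.get? (PySem.Dict.mk a) "priority" = some "caution" ∨
     PySem.Dict.get? (PySem.Dict.mk a) "priority" = some "opportunity" ∨
     PySem.Dict.get? (PySem.Dict.mk a) "priority" = some "check") →
    (PySem.Dict.mk a).contains "name" = true ∧ (PySem.Dict.mk a).contains "action" = true

instance (actions : List (List (String × String))) (alert_mode : String) : Decidable (Pre_format_daily_actions actions alert_mode) := by
  unfold Pre_format_daily_actions; infer_instance

def pvWitness_format_daily_actions : (List (List (String × String))) × String :=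
  ([[("priority", "urgent"), ("name", "AAPL"), ("action", "buy")], [("name", "x")]], "normal")

def Spec_format_daily_actions (actions : List (List (String × String))) (alert_mode : String) (out : String) : Prop := out = format_daily_actions_alt actions alert_mode
instance (actions : List (List (String × String))) (alert_mode : String) (out : String) : Decidable (Spec_format_daily_actions actions alert_mode out) := by unfold Spec_format_daily_actions; infer_instance

-- ===== CLAIM (what is proved, stated in full; the proofs are below) =====
def Claim_equal_format_daily_actions : Prop := ∀ (actions : List (List (String × String))) (alert_mode : String), Dom_format_daily_actions actions alert_mode → Pre_format_daily_actions actions alert_mode → Spec_format_daily_actions actions alert_mode (format_daily_actions actions alert_mode)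

-- ===== LEMMAS AND PROOFS =====

-- one step of A's inner loop emits exactly B's two lines for the item
theorem aInnerStep_eq (lines : List String) (item : List (String × String)) :
    aInnerStep lines item = lines ++ bItemLines item := by
  unfold aInnerStep bItemLines agGetD
  by_cases hm : (PySem.Str.strip (PySem.Dict.getD (PySem.Dict.mk item) "manager_label" "") == "") = true <;> simp [hm]

-- A's inner loop over the items of one section = B's flatMap
theorem innerA_eq (items : List (List (String × String))) (lines : List String) :
    items.foldl aInnerStep lines = lines ++ items.flatMap bItemLines := by
  induction items generalizing lines with
  | nil => simp
  | cons a t ih => simp [List.foldl_cons, aInnerStep_eq, ih]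

-- one step of A's outer loop appends exactly one of B's sections
theorem aOuterStep_eq (actions : List (List (String × String))) (lines : List String)
    (p label : String)
    (hlab : PySem.Dict.getD (PySem.Dict.mk [("urgent", "🔴 긴급 조치"), ("caution", "🟡 주의 필요"), ("opportunity", "🟢 매수 기회"), ("check", "⚪ 확인 사항")]) p "" = label) :
    aOuterStep actions lines p = lines ++ bSection label (actions.filter (fun a => agGet a "priority" == some p)) := by
  simp only [aOuterStep, bSection]
  rw [hlab]
  split <;> simp_all [innerA_eq]

-- one step of B's pass appends the action to the bucket of its priority (if any)
theorem bSplitStep_eq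
    (bs : List (List (String × String)) × List (List (String × String)) × List (List (String × String)) × List (List (String × String)))
    (a : List (String × String)) :
    bSplitStep bs a =
      (bs.1 ++ (if agGet a "priority" == some "urgent" then [a] else []),
       bs.2.1 ++ (if agGet a "priority" == some "caution" then [a] else []),
       bs.2.2.1 ++ (if agGet a "priority" == some "opportunity" then [a] else []),
       bs.2.2.2 ++ (if agGet a "priority" == some "check" then [a] else [])) := by
  unfold bSplitStep agGet
  split_ifs <;> simp_all

-- B's single pass produces the four filters, in order
theorem bSplit_go (l : List (List (String × String)))
    (u c o k : List (List (String × String))) :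
    l.foldl bSplitStep (u, c, o, k) =
      (u ++ l.filter (fun a => agGet a "priority" == some "urgent"),
       c ++ l.filter (fun a => agGet a "priority" == some "caution"),
       o ++ l.filter (fun a => agGet a "priority" == some "opportunity"),
       k ++ l.filter (fun a => agGet a "priority" == some "check")) := by
  induction l generalizing u c o k with
  | nil => simp
  | cons a t ih =>
    rw [List.foldl_cons, bSplitStep_eq, ih]
    simp only [List.filter_cons]
    split_ifs <;> simp

-- the count A computes per priority is the length of B's bucket
theorem cnt_eq (actions : List (List (String × String))) (p : String) :
    List.countP (fun a => agGet a "priority" == some p) actions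
      = (actions.filter (fun a => agGet a "priority" == some p)).length := by
  simp [List.countP_eq_length_filter]

-- ===== VERDICT (by name: the statement is the Claim_ definition above) =====
theorem format_daily_actions_spec : Claim_equal_format_daily_actions := by
  intro actions alert_mode _ _
  unfold Spec_format_daily_actions format_daily_actions format_daily_actions_alt
  by_cases h : actions = []
  · simp [h]
  · simp only [if_neg h]
    rw [bSplit_go]
    simp only [List.foldl_cons, List.foldl_nil, List.map_cons, List.map_nil, List.nil_append]
    rw [aOuterStep_eq actions _ "urgent" "🔴 긴급 조치" (by decide),
        aOuterStep_eq _ _ "caution" "🟡 주의 필요" (by decide),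
        aOuterStep_eq _ _ "opportunity" "🟢 매수 기회" (by decide),
        aOuterStep_eq _ _ "check" "⚪ 확인 사항" (by decide)]
    simp [PySem.Dict.getD, PySem.Dict.get?, cnt_eq, List.append_assoc]
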